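-- pv_equiv track=rewrite | github.com/EthoML/VAME | src/vame/analysis/pose_segmentation.py | matrix_dimension
-- ===== SOURCE A (Python) =====
-- import math
--
-- def matrix_dimension(n_subplots):
--     """
--     Calculates the optimal plot dimensions (rows, cols) for a subplot grid with concideration for edge cases.
--     * developed to handel varying numbers of n motifs
--
--     Parameters
--     ----------
--     n_subplots : int
--        total number of subplots needed
--
--     Returns
--     -------
--     tuple (int,int)
--         (row, col)
--     """
--     #initialize variables
--     best_rows = 1
--     best_cols = n_subplots
--     min_diff = n_subplots - 1
--
--     # check relavent divisors
--     for rows in range(1, int(math.sqrt(n_subplots)) + 1):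
--         if n_subplots % rows == 0:
--             cols = n_subplots // rows
--             diff = abs(cols - rows)
--
--             # check fit
--             if diff < min_diff:
--                 min_diff = diff
--                 best_rows = rows
--                 best_cols = cols
--             # Prioritize completely filled grids
--             elif diff == min_diff and rows * cols == n_subplots:
--                 best_rows, best_cols = rows, cols
--
--
--     if best_rows * best_cols != n_subplots:
--         return None  # No valid dimensions found
--
--     return (best_rows, best_cols)
-- ===== SOURCE B (Python) =====
-- import math
--
-- def matrix_dimension(n_subplots):
--     """Closest factor pair (rows, cols): first divisor scanning down from sqrt."""
--     for rows in range(int(math.sqrt(n_subplots)), 0, -1):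
--         if n_subplots % rows == 0:
--             return (rows, n_subplots // rows)
--     return (1, n_subplots)
-- ===== Notes on version B (the rewrite author's own statement) =====
-- stated objective: simpler
-- what changed: Replaces the ascending divisor scan with min_diff/best accumulators and dead tie/None branches by a single descending scan from int(sqrt(n)) that returns at the first divisor found, defaulting to (1, n).
import Mathlib
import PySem

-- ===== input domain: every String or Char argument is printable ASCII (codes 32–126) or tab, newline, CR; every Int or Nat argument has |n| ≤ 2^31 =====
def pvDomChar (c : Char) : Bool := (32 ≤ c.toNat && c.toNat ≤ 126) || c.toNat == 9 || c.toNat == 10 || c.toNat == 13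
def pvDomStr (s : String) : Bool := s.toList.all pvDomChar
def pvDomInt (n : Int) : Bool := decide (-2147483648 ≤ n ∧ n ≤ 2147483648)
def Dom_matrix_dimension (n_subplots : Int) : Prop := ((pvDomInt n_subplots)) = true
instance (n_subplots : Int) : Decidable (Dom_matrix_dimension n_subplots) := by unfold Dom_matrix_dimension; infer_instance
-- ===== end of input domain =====

-- B replaces A's ascending scan with min_diff/best accumulators by a descending
-- first-divisor scan from int(sqrt(n)) with default (1, n): simpler (return value only).

-- int(math.sqrt(n)) for 0 ≤ n ≤ 2^31 equals the integer square root (exact on the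
-- stated domain; math.sqrt raises ValueError for n < 0, excluded by Pre_).
def pySqrtInt (n : Int) : Int := Int.ofNat n.toNat.sqrt

-- ===== PORT A =====
def mdStep (n : Int) (s : Int × Int × Int) (rows : Int) : Int × Int × Int :=
  if PySem.Int.mod n rows == 0 then
    let cols := PySem.Int.floordiv n rows
    let diff := |cols - rows|
    if diff < s.2.2 then (rows, cols, diff)
    else if diff == s.2.2 && rows * cols == n then (rows, cols, s.2.2)
    else s
  else s

def matrix_dimension (n_subplots : Int) : Option (Int × Int) :=
  let r := (PySem.List.pyRange 1 (pySqrtInt n_subplots + 1) 1).foldl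
            (mdStep n_subplots) (1, n_subplots, n_subplots - 1)
  if r.1 * r.2.1 ≠ n_subplots then none else some (r.1, r.2.1)

-- ===== PORT B =====
def mdAltGo (n : Int) : List Int → Option (Int × Int)
  | [] => some (1, n)
  | rows :: rest =>
      if PySem.Int.mod n rows == 0 then some (rows, PySem.Int.floordiv n rows)
      else mdAltGo n rest

def matrix_dimension_alt (n_subplots : Int) : Option (Int × Int) :=
  mdAltGo n_subplots (PySem.List.pyRange (pySqrtInt n_subplots) 0 (-1))

-- ===== PRECONDITION & SPEC =====
-- math.sqrt raises ValueError on negative input in both A and B; Pre_ excludes n < 0.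
def Pre_matrix_dimension (n_subplots : Int) : Prop := 0 ≤ n_subplots
instance (n_subplots : Int) : Decidable (Pre_matrix_dimension n_subplots) := by
  unfold Pre_matrix_dimension; infer_instance

def pvWitness_matrix_dimension : Int := (12)

def Spec_matrix_dimension (n_subplots : Int) (out : Option (Int × Int)) : Prop := out = matrix_dimension_alt n_subplots
instance (n_subplots : Int) (out : Option (Int × Int)) : Decidable (Spec_matrix_dimension n_subplots out) := by unfold Spec_matrix_dimension; infer_instance

-- ===== CLAIM (what is proved, stated in full; the proofs are below) =====
def Claim_equal_matrix_dimension : Prop := ∀ (n_subplots : Int), Dom_matrix_dimension n_subplots → Pre_matrix_dimension n_subplots → Spec_matrix_dimension n_subplots (matrix_dimension n_subplots)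

-- ===== LEMMAS AND PROOFS =====

-- the largest divisor of n among 1..k (1 when the range is empty)
def bigDiv (n : Int) : Nat → Int
  | 0 => 1
  | k+1 => if PySem.Int.mod n ((k : Int)+1) == 0 then (k : Int)+1 else bigDiv n k

theorem bigDiv_pos (n : Int) (k : Nat) : 1 ≤ bigDiv n k := by
  induction k with
  | zero => simp [bigDiv]
  | succ k ih =>
      by_cases h : ((k : Int)+1) ∣ n
      · simp [bigDiv, h]
      · simp [bigDiv, h]
        exact ih

theorem bigDiv_le (n : Int) (k : Nat) (hk : 1 ≤ k) : bigDiv n k ≤ (k : Int) := by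
  induction k with
  | zero => omega
  | succ k ih =>
      unfold bigDiv
      split_ifs with h
      · omega
      · rcases Nat.eq_zero_or_pos k with hk0 | hk1
        · subst hk0
          have h1 : bigDiv n 0 = 1 := rfl
          rw [h1]; norm_num
        · have := ih hk1; push_cast; omega

theorem bigDiv_dvd (n : Int) (k : Nat) : bigDiv n k ∣ n := by
  induction k with
  | zero => simp [bigDiv]
  | succ k ih =>
      by_cases hdvd : ((k : Int)+1) ∣ n
      · simp [bigDiv, hdvd]
      · simp [bigDiv, hdvd, ih]

theorem A_fold (n : Int) (hn : 1 ≤ n) (k : Nat) (hk : (k : Int) * (k : Int) ≤ n) :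
    (PySem.List.pyRange 1 ((k : Int) + 1) 1).foldl (mdStep n) (1, n, n - 1)
      = (bigDiv n k, n / bigDiv n k, n / bigDiv n k - bigDiv n k) := by
  induction k with
  | zero =>
      rw [show ((0 : Nat) : Int) + 1 = 1 by norm_num, PySem.List.pyRange_one_eq_nil (le_refl 1)]
      simp [bigDiv]
  | succ k ih =>
      have hk' : (k : Int) * (k : Int) ≤ n := by push_cast at hk ⊢; nlinarith
      have hrng : PySem.List.pyRange 1 (((k : Nat) : Int) + 1 + 1) 1
          = PySem.List.pyRange 1 ((k : Int) + 1) 1 ++ [(k : Int) + 1] := by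
        have := PySem.List.pyRange_one_succ_right (a := 1) (b := (k : Int) + 1) (by omega)
        simpa using this
      rw [show (((k+1 : Nat)) : Int) = (k : Int) + 1 by push_cast; ring] at *
      rw [hrng, List.foldl_append, ih hk']
      set r : Int := (k : Int) + 1 with hr
      by_cases hdvd : r ∣ n
      · have hm : PySem.Int.mod n r = 0 := (PySem.Int.mod_eq_zero_iff_dvd n r).mpr hdvd
        have hrpos : 0 < r := by omega
        have hmul : r * (n / r) = n := Int.mul_ediv_cancel' hdvd
        have hfd : PySem.Int.floordiv n r = n / r := PySem.Int.floordiv_eq_ediv_of_pos hrpos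
        have hrle : r ≤ n / r := by nlinarith [hmul]
        set d : Int := bigDiv n k with hd
        have hdpos : 1 ≤ d := bigDiv_pos n k
        have hddvd : d ∣ n := bigDiv_dvd n k
        have hdmul : d * (n / d) = n := Int.mul_ediv_cancel' hddvd
        have hqpos : 1 ≤ n / d := by nlinarith [hdmul]
        have hdvd' : ((k : Int)+1) ∣ n := hr ▸ hdvd
        have hbig : bigDiv n (k+1) = r := by rw [hr]; simp [bigDiv, hdvd']
        have habs : |n / r - r| = n / r - r := abs_of_nonneg (by omega)
        rcases lt_or_ge d r with hdr | hrd
        · -- strictly better diff: first branch fires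
          have hqlt : n / r < n / d := by
            by_contra hcon
            rw [not_lt] at hcon
            have hqr : 1 ≤ n / r := by omega
            nlinarith [hmul, hdmul]
          have hlt : n / r - r < n / d - d := by omega
          rw [hbig]
          simp [mdStep, hm, hfd, habs, hlt]
        · -- d = r (only possible when both are 1): elif branch rewrites the same values
          have hrd' : d ≤ r := by
            rcases Nat.eq_zero_or_pos k with h0 | h1
            · subst h0; simp [bigDiv, hd]; omega
            · have := bigDiv_le n k h1; omega
          have heq : d = r := le_antisymm hrd' hrd
          rw [hbig]
          simp [mdStep, hm, hfd, habs, heq, hmul]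
      · have hm : PySem.Int.mod n r ≠ 0 := fun h => hdvd ((PySem.Int.mod_eq_zero_iff_dvd n r).mp h)
        have hdvd' : ¬((k : Int)+1) ∣ n := hr ▸ hdvd
        have hbig : bigDiv n (k+1) = bigDiv n k := by simp [bigDiv, hdvd']
        rw [hbig]
        simp [mdStep, hm]

theorem B_go (n : Int) (k : Nat) :
    mdAltGo n (PySem.List.pyRange (k : Int) 0 (-1)) = some (bigDiv n k, n / bigDiv n k) := by
  induction k with
  | zero =>
      rw [show ((0 : Nat) : Int) = 0 by norm_num, PySem.List.pyRange_neg_one_eq_nil (le_refl 0)]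
      simp [mdAltGo, bigDiv]
  | succ k ih =>
      have hc : PySem.List.pyRange (((k+1 : Nat)) : Int) 0 (-1)
          = (((k+1 : Nat)) : Int) :: PySem.List.pyRange ((((k+1 : Nat)) : Int) - 1) 0 (-1) :=
        PySem.List.pyRange_neg_one_cons (by push_cast; omega)
      rw [hc]
      have h1 : (((k+1 : Nat)) : Int) - 1 = (k : Int) := by push_cast; ring
      have h2 : (((k+1 : Nat)) : Int) = (k : Int) + 1 := by push_cast; ring
      rw [h1, h2]
      by_cases hdvd : ((k : Int)+1) ∣ n
      · simp [mdAltGo, hdvd, bigDiv]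
      · simp [mdAltGo, hdvd, bigDiv]
        exact ih

-- ===== VERDICT (by name: the statement is the Claim_ definition above) =====
theorem matrix_dimension_spec : Claim_equal_matrix_dimension := by
  intro n _ hpre
  unfold Spec_matrix_dimension
  rcases eq_or_lt_of_le hpre with h0 | hn
  · subst h0; decide
  · have hn1 : 1 ≤ n := hn
    set k : Nat := n.toNat.sqrt with hk
    have hsq : (k : Int) * (k : Int) ≤ n := by
      have h1 : n.toNat.sqrt * n.toNat.sqrt ≤ n.toNat := by
        simpa [pow_two] using Nat.sqrt_le' n.toNat
      have h2 : ((n.toNat.sqrt * n.toNat.sqrt : Nat) : Int) ≤ ((n.toNat : Nat) : Int) := by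
        exact_mod_cast h1
      rw [Int.toNat_of_nonneg (le_of_lt hn)] at h2
      push_cast at h2; exact h2
    have hps : pySqrtInt n = (k : Int) := rfl
    have hA := A_fold n hn1 k hsq
    have hB := B_go n k
    set d : Int := bigDiv n k with hd
    have hddvd : d ∣ n := bigDiv_dvd n k
    have hdmul : d * (n / d) = n := Int.mul_ediv_cancel' hddvd
    unfold matrix_dimension matrix_dimension_alt
    rw [hps, hA, hB]
    simp [hdmul]
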